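-- pv_equiv track=rewrite | github.com/FormulaTranslator/AdventOfCode2015 | Bit16_FUNCS.py | BinLshift
-- ===== SOURCE A (Python) =====
-- def Dec2Bin(numb):
--     Binary = ['0']*16
--     for num in range(0, numb):
--         if Binary[15] == '0':
--             Binary[15] = '1'
--         else:
--             index = 15
--             while Binary[index] == '1':
--                 Binary[index] = '0'
--                 index -= 1
--             Binary[index] = '1'
--     # return int(''.join(Binary))
--     return Binary
--
-- def Bin2Dec(numb):
--     Binary = ['0']*16
--     Final_Number = 0
--     Bin = 0
--     while numb != Bin:
--         if Binary[15] == '0':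
--             Binary[15] = '1'
--         else:
--             index = 15
--             while Binary[index] == '1':
--                 Binary[index] = '0'
--                 index -= 1
--             Binary[index] = '1'
--         Final_Number += 1
--         Bin = int(''.join(Binary))
--     return Final_Number
--
-- def BinLshift(a, amount):
--     Bin1 = Dec2Bin(a)
--     Lshift = ['0']*16
--     for numbers in range(0, 16):
--         shift_number = numbers + amount
--         if shift_number <= 15:
--             # shift_number -= 16
--             Lshift[numbers] = Bin1[shift_number]
--     return Bin2Dec(int(''.join(Lshift)))
-- ===== SOURCE B (Python) =====
-- def BinLshift(a, amount):
--     if amount >= 16: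
--         return 0
--     return (a << amount) % 0x10000
-- ===== Notes on version B (the rewrite author's own statement) =====
-- stated objective: faster
-- what changed: Replaces the unary increment loop that builds a 16-char binary array, the index-copy shift loop, and the count-up-until-decimal-reading-matches decoder with a single closed-form arithmetic expression (a << amount) % 0x10000 (0 when amount >= 16).
-- intended difference: For a outside the 16-bit range (a < 0 or a >= 65536) with amount <= 15, A returns 0 (its bit-building loop never runs) or a value wrapped modulo 65535 by a carry bug (e.g. A(65536,0)=1), while B returns the intended 16-bit result (a << amount) mod 65536. — e.g. on BinLshift(-1, 0): A returns 0, B returns 65535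
-- outside the precondition, e.g. on BinLshift(5, -1): A returns 32770, B raises ValueError; on BinLshift(5, -20): A raises IndexError, B raises ValueError
import Mathlib
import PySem

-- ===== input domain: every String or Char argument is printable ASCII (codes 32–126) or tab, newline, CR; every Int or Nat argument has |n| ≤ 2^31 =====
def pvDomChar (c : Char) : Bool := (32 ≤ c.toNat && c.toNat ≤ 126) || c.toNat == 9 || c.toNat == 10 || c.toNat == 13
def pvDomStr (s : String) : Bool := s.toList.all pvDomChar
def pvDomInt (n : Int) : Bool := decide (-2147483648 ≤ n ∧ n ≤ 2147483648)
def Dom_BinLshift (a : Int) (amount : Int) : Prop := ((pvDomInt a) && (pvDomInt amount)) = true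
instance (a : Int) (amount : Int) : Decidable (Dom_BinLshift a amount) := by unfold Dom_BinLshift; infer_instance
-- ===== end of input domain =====

-- B replaces A's three loops (unary build of a 16-char bit array, index-copy shift, count-up decode)
-- by the closed form (a << amount) % 0x10000, returning 0 when amount >= 16.

-- ===== PORT A =====

-- Python `Binary[index] = c` (index here is always in range for the 16-lists used)
def pySetIdx (B : List Char) (i : Int) (c : Char) : List Char := PySem.List.pySetD B i c

-- the inner `while Binary[index] == '1': Binary[index] = '0'; index -= 1` followed by `Binary[index] = '1'`;
-- fuel 17 always suffices: a 16-element list holds at most 16 '1's before a '0' (possibly the wrapped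
-- Binary[-1]) is hit, so the fuel-exhausted branch is unreachable, as is the '?' default of pyGet?.
def clearLoop : Nat → List Char → Int → List Char
  | 0, B, _ => B
  | f + 1, B, index =>
    if (PySem.List.pyGet? B index).getD '?' = '1' then
      clearLoop f (pySetIdx B index '0') (index - 1)
    else
      pySetIdx B index '1'

-- the increment step shared by Dec2Bin's and Bin2Dec's loop bodies (identical inline code in the Python)
def pyInc (B : List Char) : List Char :=
  if (PySem.List.pyGet? B 15).getD '?' = '0' then pySetIdx B 15 '1'
  else clearLoop 17 B 15

def Dec2Bin (numb : Int) : List Char :=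
  (PySem.List.pyRange 0 numb 1).foldl (fun B _ => pyInc B) (List.replicate 16 '0')

-- int(''.join(B)): decimal reading of the digit chars; exact on '0'/'1' lists, which every list joined here is
def pyDecRead (B : List Char) : Int :=
  B.foldl (fun acc c => acc * 10 + ((c.toNat : Int) - 48)) 0

-- the `while numb != Bin` loop of Bin2Dec; for every numb produced by BinLshift (its only caller) the Python
-- loop returns within at most 65535 iterations, so fuel 65536 is exact there; on a numb no 16-bit pattern
-- reaches, the Python diverges and the fuel-exhausted branch is unreachable from BinLshift.
def binGo : Nat → Int → List Char → Int → Int → Int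
  | 0, _, _, fn, _ => fn
  | f + 1, numb, B, fn, bin =>
    if numb = bin then fn
    else
      let B' := pyInc B
      binGo f numb B' (fn + 1) (pyDecRead B')

def Bin2Dec (numb : Int) : Int := binGo 65536 numb (List.replicate 16 '0') 0 0

def BinLshift (a : Int) (amount : Int) : Int :=
  let Bin1 := Dec2Bin a
  let Lshift :=
    (PySem.List.pyRange 0 16 1).foldl
      (fun L numbers =>
        if numbers + amount ≤ 15 then
          match PySem.List.pyGet? Bin1 (numbers + amount) with
          | some c => pySetIdx L numbers c
          | none => L          -- Python raises IndexError here (amount ≤ -17); such inputs lie outside Pre_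
        else L)
      (List.replicate 16 '0')
  Bin2Dec (pyDecRead Lshift)

-- ===== PORT B =====
def BinLshift_alt (a : Int) (amount : Int) : Int :=
  if 16 ≤ amount then 0
  else PySem.Int.mod (a <<< amount.toNat) 65536
  -- amount.toNat is exact under Pre_ (0 ≤ amount); the Python B raises ValueError on a negative shift count

-- ===== PRECONDITION & SPEC =====
-- Pre_ excludes negative amount: there B's shift raises ValueError, while A either right-rotates through
-- Python negative-index wraparound (-16 ≤ amount ≤ -1) or raises IndexError (amount ≤ -17).
def Pre_BinLshift (a : Int) (amount : Int) : Prop := 0 ≤ amount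
instance (a : Int) (amount : Int) : Decidable (Pre_BinLshift a amount) := by unfold Pre_BinLshift; infer_instance

def pvWitness_BinLshift : Int × Int := (3, 2)

-- For a outside the 16-bit range (a < 0 or a ≥ 65536) with amount ≤ 15, A returns 0 (its bit-building loop
-- never runs) or a value wrapped modulo 65535 by a carry bug (e.g. A(65536,0)=1), while B returns the
-- intended 16-bit result (a << amount) mod 65536.
def D_BinLshift (a : Int) (amount : Int) : Prop := amount ≤ 15 ∧ (a < 0 ∨ 65536 ≤ a)
instance (a : Int) (amount : Int) : Decidable (D_BinLshift a amount) := by unfold D_BinLshift; infer_instance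

def Spec_BinLshift (a : Int) (amount : Int) (out : Int) : Prop :=
  ¬ D_BinLshift a amount → out = BinLshift_alt a amount
instance (a : Int) (amount : Int) (out : Int) : Decidable (Spec_BinLshift a amount out) := by
  unfold Spec_BinLshift; infer_instance

def pvDiffWitness_BinLshift : Int × Int := (-1, 0)
def pvDiffWitnessOut_BinLshift : Int × Int := (0, 65535)

-- ===== CLAIM (what is proved, stated in full; the proofs are below) =====
def Claim_unchanged_BinLshift : Prop := ∀ (a : Int) (amount : Int), Dom_BinLshift a amount →
  Pre_BinLshift a amount → Spec_BinLshift a amount (BinLshift a amount)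
def Claim_changed_BinLshift : Prop :=
  Dom_BinLshift (pvDiffWitness_BinLshift.1) (pvDiffWitness_BinLshift.2) ∧
  Pre_BinLshift (pvDiffWitness_BinLshift.1) (pvDiffWitness_BinLshift.2) ∧
  D_BinLshift (pvDiffWitness_BinLshift.1) (pvDiffWitness_BinLshift.2) ∧
  BinLshift (pvDiffWitness_BinLshift.1) (pvDiffWitness_BinLshift.2) = pvDiffWitnessOut_BinLshift.1 ∧
  BinLshift_alt (pvDiffWitness_BinLshift.1) (pvDiffWitness_BinLshift.2) = pvDiffWitnessOut_BinLshift.2 ∧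
  pvDiffWitnessOut_BinLshift.1 ≠ pvDiffWitnessOut_BinLshift.2

-- ===== LEMMAS AND PROOFS =====

-- the canonical 16-bit pattern (MSB first): the value A's char arrays always hold
def bitsN : Nat → Nat → List Char
  | 0, _ => []
  | n + 1, m => bitsN n (m / 2) ++ [if m % 2 = 1 then '1' else '0']

theorem bitsN_length (n m : Nat) : (bitsN n m).length = n := by
  induction n generalizing m with
  | zero => rfl
  | succ n ih => simp [bitsN, ih]

theorem bitsN_zero (n : Nat) : bitsN n 0 = List.replicate n '0' := by
  induction n with
  | zero => rfl
  | succ n ih => rw [bitsN]; simp [ih, List.replicate_succ']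

theorem bitsN_ones (n : Nat) : bitsN n (2 ^ n - 1) = List.replicate n '1' := by
  induction n with
  | zero => rfl
  | succ n ih =>
    have hp : 0 < 2 ^ n := Nat.two_pow_pos n
    rw [bitsN]
    have hd : (2 ^ (n + 1) - 1) / 2 = 2 ^ n - 1 := by
      have h2 : 2 ^ (n + 1) = 2 * 2 ^ n := by ring
      omega
    have hm : (2 ^ (n + 1) - 1) % 2 = 1 := by
      have h2 : 2 ^ (n + 1) = 2 * 2 ^ n := by ring
      omega
    rw [hd, hm, ih]
    simp [List.replicate_succ']

theorem bitsN_add : ∀ (k : Nat) (n q r : Nat), r < 2 ^ k → k ≤ n →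
    bitsN n (q * 2 ^ k + r) = bitsN (n - k) q ++ bitsN k r := by
  intro k
  induction k with
  | zero =>
    intro n q r hr _
    interval_cases r
    simp [bitsN]
  | succ k ih =>
    intro n q r hr hkn
    obtain ⟨n', rfl⟩ : ∃ n', n = n' + 1 := ⟨n - 1, by omega⟩
    rw [bitsN]
    have h2' : q * 2 ^ (k + 1) = 2 * (q * 2 ^ k) := by ring
    have hd : (q * 2 ^ (k + 1) + r) / 2 = q * 2 ^ k + r / 2 := by
      rw [h2']; omega
    have hm : (q * 2 ^ (k + 1) + r) % 2 = r % 2 := by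
      rw [h2']; omega
    have h2 : 2 ^ (k + 1) = 2 * 2 ^ k := by ring
    rw [hd, hm, ih n' q (r / 2) (by omega) (by omega)]
    have : bitsN (k + 1) r = bitsN k (r / 2) ++ [if r % 2 = 1 then '1' else '0'] := rfl
    rw [this]
    rw [List.append_assoc]
    congr 2
    omega

theorem decRead_append (xs : List Char) (c : Char) :
    pyDecRead (xs ++ [c]) = 10 * pyDecRead xs + ((c.toNat : Int) - 48) := by
  simp [pyDecRead, List.foldl_append]; ring

theorem toNat_one_char : (('1'.toNat : Int)) = 49 := by decide
theorem toNat_zero_char : (('0'.toNat : Int)) = 48 := by decide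

theorem decRead_bits (n m : Nat) :
    pyDecRead (bitsN (n + 1) m) = 10 * pyDecRead (bitsN n (m / 2)) + ((m % 2 : Nat) : Int) := by
  rw [bitsN, decRead_append]
  have hbit : (((if m % 2 = 1 then '1' else '0').toNat : Int)) - 48 = ((m % 2 : Nat) : Int) := by
    rcases Nat.mod_two_eq_zero_or_one m with h | h
    · rw [if_neg (by omega), toNat_zero_char, h]; norm_num
    · rw [if_pos h, toNat_one_char, h]; norm_num
  rw [hbit]

theorem decRead_bits_nonneg (n m : Nat) : 0 ≤ pyDecRead (bitsN n m) := by
  induction n generalizing m with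
  | zero => simp [bitsN, pyDecRead]
  | succ n ih =>
    rw [decRead_bits]
    have := ih (m / 2)
    have : (0:Int) ≤ ((m % 2 : Nat) : Int) := by positivity
    omega

theorem decRead_inj : ∀ (n : Nat) (m₁ m₂ : Nat), m₁ < 2 ^ n → m₂ < 2 ^ n →
    pyDecRead (bitsN n m₁) = pyDecRead (bitsN n m₂) → m₁ = m₂ := by
  intro n
  induction n with
  | zero => intro m₁ m₂ h1 h2 _; omega
  | succ n ih =>
    intro m₁ m₂ h1 h2 he
    rw [decRead_bits, decRead_bits] at he
    have d1 := decRead_bits_nonneg n (m₁ / 2)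
    have d2 := decRead_bits_nonneg n (m₂ / 2)
    have hpow : 2 ^ (n + 1) = 2 * 2 ^ n := by ring
    rw [hpow] at h1 h2
    have hq : m₁ / 2 = m₂ / 2 := by
      have := ih (m₁ / 2) (m₂ / 2) (by omega) (by omega)
      omega
    rw [hq] at he
    omega

theorem set_append_len (pre : List Char) (y : Char) (ys : List Char) (v : Char) :
    (pre ++ y :: ys).set pre.length v = pre ++ v :: ys := by
  rw [List.set_append_right _ _ (le_refl _)]
  simp

theorem clear_run : ∀ (k : Nat) (f : Nat) (xs zs : List Char), k < f →
    clearLoop f (xs ++ '0' :: (List.replicate k '1' ++ zs)) ((xs.length : Int) + (k : Int)) =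
    xs ++ '1' :: (List.replicate k '0' ++ zs) := by
  intro k
  induction k with
  | zero =>
    intro f xs zs hf
    obtain ⟨g, rfl⟩ : ∃ g, f = g + 1 := ⟨f - 1, by omega⟩
    rw [clearLoop]
    have hidx : (xs.length : Int) + (0 : Nat) = ((xs.length : Nat) : Int) := by push_cast; ring
    rw [hidx, PySem.List.pyGet?_natCast]
    simp only [List.replicate, List.nil_append]
    rw [List.getElem?_append_right (le_refl _)]
    simp only [Nat.sub_self, List.getElem?_cons_zero, Option.getD_some]
    rw [if_neg (by decide)]
    unfold pySetIdx
    rw [PySem.List.pySetD_natCast, set_append_len]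
  | succ k ih =>
    intro f xs zs hf
    obtain ⟨g, rfl⟩ : ∃ g, f = g + 1 := ⟨f - 1, by omega⟩
    rw [clearLoop]
    have hidx : (xs.length : Int) + ((k : Int) + 1) = (((xs.length + k + 1 : Nat)) : Int) := by
      push_cast; ring
    have hsplit : xs ++ '0' :: (List.replicate (k + 1) '1' ++ zs)
        = (xs ++ '0' :: List.replicate k '1') ++ '1' :: zs := by
      simp [List.replicate_succ', List.append_assoc]
    have hlen : (xs ++ '0' :: List.replicate k '1').length = xs.length + k + 1 := by
      simp; omega
    push_cast at hidx
    rw [show (k : Int) + 1 = ((k + 1 : Nat) : Int) by push_cast; ring] at *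
    have hidx2 : (xs.length : Int) + ((k + 1 : Nat) : Int) = (((xs ++ '0' :: List.replicate k '1').length : Nat) : Int) := by
      rw [hlen]; push_cast; ring
    rw [hidx2, hsplit, PySem.List.pyGet?_natCast]
    rw [List.getElem?_append_right (le_refl _)]
    simp only [Nat.sub_self, List.getElem?_cons_zero, Option.getD_some]
    unfold pySetIdx
    rw [PySem.List.pySetD_natCast, set_append_len]
    have hres : (xs ++ '0' :: List.replicate k '1') ++ '0' :: zs
        = xs ++ '0' :: (List.replicate k '1' ++ '0' :: zs) := by
      simp [List.append_assoc]
    have hidx3 : ((((xs ++ '0' :: List.replicate k '1').length : Nat) : Int)) - 1 = (xs.length : Int) + (k : Int) := by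
      rw [hlen]; push_cast; ring
    rw [hres, hidx3, ih g xs ('0' :: zs) (by omega)]
    simp [List.replicate_succ', List.append_assoc]

theorem pyInc_bits (a : Nat) (h : a + 1 < 65536) :
    pyInc (bitsN 16 a) = bitsN 16 (a + 1) := by
  unfold pyInc
  rcases Nat.even_or_odd a with he | ho
  · -- a even: last char is '0'
    have hm : a % 2 = 0 := Nat.even_iff.mp he
    have hlast : bitsN 16 a = bitsN 15 (a / 2) ++ '0' :: [] := by
      show bitsN (15 + 1) a = _
      rw [bitsN, hm]; norm_num
    have key : bitsN 16 (a + 1) = bitsN 15 (a / 2) ++ '1' :: [] := by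
      show bitsN (15 + 1) (a + 1) = _
      rw [bitsN, show (a + 1) / 2 = a / 2 by omega, show (a + 1) % 2 = 1 by omega]; norm_num
    have hl15 : (bitsN 15 (a / 2)).length = 15 := bitsN_length 15 _
    rw [hlast]
    rw [show (15 : Int) = ((bitsN 15 (a / 2)).length : Int) by simp [hl15]]
    rw [PySem.List.pyGet?_append_length]
    rw [Option.getD_some, if_pos rfl]
    unfold pySetIdx
    rw [PySem.List.pySetD_natCast, set_append_len, key]
  · -- a odd: trailing run of k ones, k ≥ 1
    have hm : a % 2 = 1 := Nat.odd_iff.mp ho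
    obtain ⟨k, o, ho2, hko⟩ := Nat.exists_eq_two_pow_mul_odd (show a + 1 ≠ 0 by omega)
    obtain ⟨q, hq⟩ := ho2
    have hk1 : 1 ≤ k := by
      rcases Nat.eq_zero_or_pos k with rfl | h1
      · exfalso; simp at hko; omega
      · exact h1
    have hkle : k ≤ 15 := by
      by_contra hgt
      have : 2 ^ 16 ≤ 2 ^ k := Nat.pow_le_pow_right (by norm_num) (by omega)
      have : 2 ^ k ≤ 2 ^ k * o := Nat.le_mul_of_pos_right _ (by omega)
      omega
    have hpk : 0 < 2 ^ k := Nat.two_pow_pos k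
    have hq2 : o = 2 * q + 1 := by omega
    have ha : a = (2 * q) * 2 ^ k + (2 ^ k - 1) := by
      have h1 : a + 1 = 2 ^ k * (2 * q + 1) := by rw [hko, hq2]
      have h2 : 2 ^ k * (2 * q + 1) = (2 * q) * 2 ^ k + 2 ^ k := by ring
      omega
    have hbits : bitsN 16 a = bitsN (15 - k) q ++ '0' :: (List.replicate k '1' ++ []) := by
      rw [ha, bitsN_add k 16 (2 * q) (2 ^ k - 1) (by omega) (by omega), bitsN_ones]
      have h16k : 16 - k = (15 - k) + 1 := by omega
      rw [h16k, bitsN, show 2 * q / 2 = q by omega, show 2 * q % 2 = 0 by omega]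
      simp
    have ha1 : a + 1 = o * 2 ^ k + 0 := by rw [hko]; ring
    have hbits1 : bitsN 16 (a + 1) = bitsN (15 - k) q ++ '1' :: (List.replicate k '0' ++ []) := by
      rw [ha1, bitsN_add k 16 o 0 (by omega) (by omega), bitsN_zero]
      have h16k : 16 - k = (15 - k) + 1 := by omega
      rw [h16k, bitsN, show o / 2 = q by omega, show o % 2 = 1 by omega]
      simp
    have hxl : (bitsN (15 - k) q).length = 15 - k := bitsN_length _ _
    have hidx : (15 : Int) = (((bitsN (15 - k) q).length : Nat) : Int) + (k : Int) := by
      rw [hxl]; omega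
    have hlast : (PySem.List.pyGet? (bitsN 16 a) 15).getD '?' = '1' := by
      rw [hbits, hidx]
      rw [show ((bitsN (15 - k) q).length : Int) + (k : Int)
          = (((bitsN (15 - k) q).length + k : Nat) : Int) by push_cast; ring]
      rw [PySem.List.pyGet?_natCast]
      rw [List.getElem?_append_right (by omega)]
      have : (bitsN (15 - k) q).length + k - (bitsN (15 - k) q).length = k := by omega
      rw [this]
      obtain ⟨k', rfl⟩ : ∃ k', k = k' + 1 := ⟨k - 1, by omega⟩
      simp only [List.append_nil]
      rw [List.getElem?_cons_succ]
      simp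
    rw [hlast]
    rw [if_neg (by decide)]
    rw [hbits, hidx, clear_run k 17 _ _ (by omega), hbits1]

theorem bitsN_16_zero : bitsN 16 0 = List.replicate 16 '0' := by decide

theorem Dec2Bin_bits : ∀ (a : Nat), a < 65536 → Dec2Bin (a : Int) = bitsN 16 a := by
  intro a
  induction a with
  | zero =>
    intro _
    rw [Dec2Bin, PySem.List.pyRange_one_eq_nil (by norm_num), List.foldl_nil, bitsN_16_zero]
  | succ a ih =>
    intro h
    rw [Dec2Bin, show ((a + 1 : Nat) : Int) = (a : Int) + 1 by push_cast; ring,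
      PySem.List.pyRange_one_succ_right (by positivity), List.foldl_append, List.foldl_cons,
      List.foldl_nil]
    rw [show (PySem.List.pyRange 0 (a : Int) 1).foldl (fun B _ => pyInc B) (List.replicate 16 '0')
        = Dec2Bin (a : Int) from rfl]
    rw [ih (by omega), pyInc_bits a h]

theorem binGo_inv : ∀ (d c v : Nat), v < 65536 → c ≤ v → v - c < d →
    binGo d (pyDecRead (bitsN 16 v)) (bitsN 16 c) (c : Int) (pyDecRead (bitsN 16 c)) = (v : Int) := by
  intro d
  induction d with
  | zero => intro c v _ _ h; omega
  | succ d ih =>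
    intro c v hv hcv hd
    rw [binGo]
    by_cases he : pyDecRead (bitsN 16 v) = pyDecRead (bitsN 16 c)
    · have : v = c := decRead_inj 16 v c (by norm_num at hv ⊢; omega) (by norm_num; omega) he
      rw [if_pos he, this]
    · rw [if_neg he]
      have hne : c ≠ v := fun hh => he (by rw [hh])
      have hlt : c < v := by omega
      show binGo d _ (pyInc (bitsN 16 c)) ((c : Int) + 1) (pyDecRead (pyInc (bitsN 16 c))) = _
      rw [pyInc_bits c (by omega), show (c : Int) + 1 = ((c + 1 : Nat) : Int) by push_cast; ring]
      exact ih (c + 1) v hv (by omega) (by omega)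

theorem Bin2Dec_decRead (v : Nat) (h : v < 65536) :
    Bin2Dec (pyDecRead (bitsN 16 v)) = (v : Int) := by
  rw [Bin2Dec, show List.replicate 16 '0' = bitsN 16 0 from bitsN_16_zero.symm,
    show (0 : Int) = ((0 : Nat) : Int) by norm_num]
  nth_rewrite 2 [show ((0 : Nat) : Int) = pyDecRead (bitsN 16 0) by decide]
  exact binGo_inv 65536 0 v h (by omega) (by omega)

theorem bitsN_getElem : ∀ (n m i : Nat) (h : i < n),
    (bitsN n m)[i]'(by rw [bitsN_length]; exact h) =
      (if m / 2 ^ (n - 1 - i) % 2 = 1 then '1' else '0') := by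
  intro n
  induction n with
  | zero => intro m i h; omega
  | succ n ih =>
    intro m i h
    show (bitsN n (m/2) ++ [if m % 2 = 1 then '1' else '0'])[i]'(by simp [bitsN_length]; omega) = _
    by_cases hi : i < n
    · rw [List.getElem_append_left (by rw [bitsN_length]; exact hi)]
      rw [ih (m / 2) i hi]
      have : m / 2 / 2 ^ (n - 1 - i) = m / 2 ^ (n + 1 - 1 - i) := by
        rw [Nat.div_div_eq_div_mul]
        congr 1
        rw [← pow_succ']
        congr 1
        omega
      rw [this]
    · have hin : i = n := by omega
      subst hin
      rw [List.getElem_append_right (by simp [bitsN_length])]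
      simp [bitsN_length]

theorem shift_bit_eq (x e t : Nat) (he : e ≤ t) (ht : t < 16) :
    (x * 2 ^ e % 65536) / 2 ^ t % 2 = x / 2 ^ (t - e) % 2 := by
  have h1 : ∀ (y u : Nat), y / 2 ^ u % 2 = if y.testBit u then 1 else 0 := by
    intro y u
    rw [Nat.testBit_eq_decide_div_mod_eq]
    split_ifs with hh
    · simpa using hh
    · simp at hh; omega
  rw [h1, h1]
  have hx : x * 2 ^ e = x <<< e := (Nat.shiftLeft_eq x e).symm
  rw [hx, show (65536 : Nat) = 2 ^ 16 by norm_num, Nat.testBit_mod_two_pow,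
    Nat.testBit_shiftLeft]
  simp [ht, he]

theorem shift_bit_zero (x e t : Nat) (he : t < e) :
    (x * 2 ^ e % 65536) / 2 ^ t % 2 = 0 := by
  have h1 : ∀ (y u : Nat), y / 2 ^ u % 2 = if y.testBit u then 1 else 0 := by
    intro y u
    rw [Nat.testBit_eq_decide_div_mod_eq]
    split_ifs with hh
    · simpa using hh
    · simp at hh; omega
  rw [h1]
  rw [show x * 2 ^ e = x <<< e from (Nat.shiftLeft_eq x e).symm,
    show (65536 : Nat) = 2 ^ 16 by norm_num, Nat.testBit_mod_two_pow, Nat.testBit_shiftLeft]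
  simp [show ¬ (e ≤ t) by omega]

theorem fold_shift (a' : Nat) (s : Int) (hs0 : 0 ≤ s) :
    ∀ m : Nat, m ≤ 16 →
    (PySem.List.pyRange 0 (m : Int) 1).foldl
      (fun L numbers =>
        if numbers + s ≤ 15 then
          match PySem.List.pyGet? (bitsN 16 a') (numbers + s) with
          | some c => pySetIdx L numbers c
          | none => L
        else L)
      (List.replicate 16 '0')
    = (List.range m).map
        (fun (i : Nat) => if (i : Int) + s ≤ 15 then (bitsN 16 a').getD (i + s.toNat) '?' else '0')
      ++ List.replicate (16 - m) '0' := by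
  intro m
  induction m with
  | zero => simp [PySem.List.pyRange_one_eq_nil]
  | succ m ih =>
    intro hm
    rw [show ((m + 1 : Nat) : Int) = (m : Int) + 1 by push_cast; ring,
      PySem.List.pyRange_one_succ_right (by positivity), List.foldl_append, List.foldl_cons,
      List.foldl_nil, ih (by omega)]
    have hR : ((List.range m).map
        (fun (i : Nat) => if (i : Int) + s ≤ 15 then (bitsN 16 a').getD (i + s.toNat) '?' else '0')).length = m := by
      rw [List.length_map, List.length_range]
    have hrep : List.replicate (16 - m) '0' = '0' :: List.replicate (16 - (m + 1)) '0' := by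
      rw [show 16 - m = (16 - (m + 1)) + 1 by omega, List.replicate_succ]
    have hrange : List.range (m + 1) = List.range m ++ [m] := List.range_succ
    by_cases hc : (m : Int) + s ≤ 15
    · rw [if_pos hc]
      have hms : (m : Int) + s = ((m + s.toNat : Nat) : Int) := by push_cast; omega
      have hlt : m + s.toNat < 16 := by omega
      have hget : PySem.List.pyGet? (bitsN 16 a') ((m : Int) + s)
          = some ((bitsN 16 a').getD (m + s.toNat) '?') := by
        rw [hms, PySem.List.pyGet?_natCast, List.getElem?_eq_getElem (by rw [bitsN_length]; exact hlt)]
        rw [List.getD_eq_getElem _ _ (by rw [bitsN_length]; exact hlt)]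
      rw [hget]
      show pySetIdx _ (m : Int) _ = _
      unfold pySetIdx
      rw [PySem.List.pySetD_natCast]
      rw [hrep, List.set_append_right _ _ (le_of_eq hR), hR, Nat.sub_self, List.set_cons_zero]
      rw [hrange, List.map_append, List.map_cons, List.map_nil, List.append_assoc,
        List.singleton_append, if_pos hc]
    · rw [if_neg hc]
      rw [hrange, List.map_append, List.map_cons, List.map_nil, List.append_assoc,
        List.singleton_append, if_neg hc, ← hrep]

theorem shift_bits (a' : Nat) (s : Int) (hs0 : 0 ≤ s) (hs : s ≤ 15) :
    (PySem.List.pyRange 0 16 1).foldl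
      (fun L numbers =>
        if numbers + s ≤ 15 then
          match PySem.List.pyGet? (bitsN 16 a') (numbers + s) with
          | some c => pySetIdx L numbers c
          | none => L
        else L)
      (List.replicate 16 '0') = bitsN 16 (a' * 2 ^ s.toNat % 65536) := by
  rw [show (16 : Int) = ((16 : Nat) : Int) by norm_num,
    fold_shift a' s hs0 16 (le_refl _), Nat.sub_self, List.replicate_zero, List.append_nil]
  apply List.ext_getElem
  · rw [List.length_map, List.length_range, bitsN_length]
  · intro i h1 h2
    have hi : i < 16 := by rw [List.length_map, List.length_range] at h1; exact h1
    rw [List.getElem_map, List.getElem_range, bitsN_getElem 16 _ i hi]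
    by_cases hc : (i : Int) + s ≤ 15
    · have hlt : i + s.toNat < 16 := by omega
      rw [if_pos hc, List.getD_eq_getElem _ _ (by rw [bitsN_length]; exact hlt),
        bitsN_getElem 16 a' (i + s.toNat) hlt]
      rw [show 16 - 1 - (i + s.toNat) = (15 - i) - s.toNat by omega,
        show 16 - 1 - i = 15 - i by omega,
        shift_bit_eq a' s.toNat (15 - i) (by omega) (by omega)]
    · rw [if_neg hc,
        show 16 - 1 - i = 15 - i by omega,
        shift_bit_zero a' s.toNat (15 - i) (by omega)]
      norm_num

-- when every range element leaves the accumulator unchanged (amount ≥ 16), the fold is the identity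
theorem fold_skip (amount : Int) (B1 : List Char) :
    ∀ (l : List Int) (init : List Char), (∀ x ∈ l, ¬ (x + amount ≤ 15)) →
    l.foldl
      (fun L numbers =>
        if numbers + amount ≤ 15 then
          match PySem.List.pyGet? B1 (numbers + amount) with
          | some c => pySetIdx L numbers c
          | none => L
        else L) init = init := by
  intro l
  induction l with
  | nil => intro init _; rfl
  | cons x xs ih =>
    intro init hall
    rw [List.foldl_cons, if_neg (hall x (by simp))]
    exact ih init (fun y hy => hall y (by simp [hy]))

-- ===== VERDICT (by name: the statement is the Claim_ definition above) =====
theorem BinLshift_spec : Claim_unchanged_BinLshift := by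
  intro a amount hdom hpre
  unfold Spec_BinLshift
  intro hnd
  unfold Pre_BinLshift at hpre
  unfold D_BinLshift at hnd
  push_neg at hnd
  by_cases h16 : 16 ≤ amount
  · -- amount ≥ 16: both sides are 0
    rw [BinLshift_alt, if_pos h16]
    show Bin2Dec (pyDecRead ((PySem.List.pyRange 0 16 1).foldl _ (List.replicate 16 '0'))) = 0
    rw [fold_skip amount (Dec2Bin a) _ _ (by
      intro x hx
      have := (PySem.List.mem_pyRange_one).mp hx
      omega)]
    rw [show List.replicate 16 '0' = bitsN 16 0 from bitsN_16_zero.symm]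
    rw [Bin2Dec_decRead 0 (by norm_num)]
    norm_num
  · -- 0 ≤ amount ≤ 15 and (by ¬D_) 0 ≤ a < 65536
    have hs : amount ≤ 15 := by omega
    obtain ⟨ha0, ha1⟩ := hnd hs
    have haa : a = ((a.toNat : Nat) : Int) := (Int.toNat_of_nonneg ha0).symm
    have ha' : a.toNat < 65536 := by omega
    rw [BinLshift_alt, if_neg h16]
    show Bin2Dec (pyDecRead ((PySem.List.pyRange 0 16 1).foldl _ (List.replicate 16 '0'))) = _
    rw [show Dec2Bin a = bitsN 16 a.toNat from by rw [haa]; exact Dec2Bin_bits a.toNat ha']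
    rw [shift_bits a.toNat amount hpre hs]
    rw [Bin2Dec_decRead _ (Nat.mod_lt _ (by norm_num))]
    rw [PySem.Int.mod_eq_emod_of_pos (by norm_num)]
    rw [Int.shiftLeft_eq]
    push_cast
    rw [Int.toNat_of_nonneg ha0]

set_option maxRecDepth 8192 in
theorem BinLshift_changed : Claim_changed_BinLshift := by
  unfold Claim_changed_BinLshift; decide
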